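-- pv_equiv track=rewrite | github.com/unpingable/atproto-feeds | receipts_feed/cluster.py | _domain_family
-- ===== SOURCE A (Python) =====
-- def _domain_family(domain: str) -> str:
--     """Map domain to a family for cross-domain clustering."""
--     # Known reporting families that often cover the same story
--     families = {
--         "apnews.com": "wire",
--         "reuters.com": "wire",
--         "bbc.com": "wire", "bbc.co.uk": "wire",
--         "congress.gov": "legislative",
--         "courtlistener.com": "legal", "storage.courtlistener.com": "legal",
--         "supremecourt.gov": "legal",
--         "pubmed.ncbi.nlm.nih.gov": "research",
--         "arxiv.org": "research",
--         "nature.com": "research",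
--         "science.org": "research",
--     }
--     d = domain.lower()
--     if d in families:
--         return families[d]
--     for fd, fam in families.items():
--         if d.endswith("." + fd):
--             return fam
--     return d  # Use domain itself as family for unknowns
-- ===== SOURCE B (Python) =====
-- def _domain_family(domain: str) -> str:
--     """Map domain to a family for cross-domain clustering."""
--     # Known reporting families that often cover the same story
--     families = {
--         "apnews.com": "wire",
--         "reuters.com": "wire",
--         "bbc.com": "wire", "bbc.co.uk": "wire",
--         "congress.gov": "legislative",
--         "courtlistener.com": "legal", "storage.courtlistener.com": "legal",
--         "supremecourt.gov": "legal",
--         "pubmed.ncbi.nlm.nih.gov": "research",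
--         "arxiv.org": "research",
--         "nature.com": "research",
--         "science.org": "research",
--     }
--     d = domain.lower()
--     # Stage 1: build every candidate key the input can offer — d itself, then
--     # each dot-boundary suffix of d.  Stage 2: return the family of the first
--     # candidate present in the table; unknowns fall through to d itself.
--     candidates = [d] + [d[i + 1:] for i in range(len(d)) if d[i] == '.']
--     for c in candidates:
--         if c in families:
--             return families[c]
--     return d
-- ===== Notes on version B (the rewrite author's own statement) =====
-- stated objective: alternative
-- what changed: B is a staged two-pass: it first materialises all candidate keys derivable from the input (the lowercased domain itself plus the suffix after every '.', via an index comprehension) and then returns the family of the first candidate found in the dict, instead of A's single scan over the whole family table testing endswith for each entry; agreement uses the fact that any two table keys that are both dot-suffixes of one domain carry the same family.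
import Mathlib
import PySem

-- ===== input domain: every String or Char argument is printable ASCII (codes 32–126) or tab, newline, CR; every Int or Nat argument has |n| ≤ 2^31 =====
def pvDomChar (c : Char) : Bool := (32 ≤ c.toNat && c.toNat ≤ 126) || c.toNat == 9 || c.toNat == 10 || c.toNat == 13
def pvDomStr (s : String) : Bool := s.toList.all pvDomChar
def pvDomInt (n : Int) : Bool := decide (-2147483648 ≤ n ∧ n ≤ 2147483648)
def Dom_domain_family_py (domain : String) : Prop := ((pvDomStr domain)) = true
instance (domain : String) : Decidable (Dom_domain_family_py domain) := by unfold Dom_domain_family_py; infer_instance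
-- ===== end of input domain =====

-- B stages the work differently: it first builds every candidate key the input offers
-- (the lowercased domain, then the suffix after each '.') and then takes the family of the
-- first candidate present in the table, instead of A's endswith scan over the whole table
-- (alternative algorithm, same result).

-- ===== PORT A =====
-- the dict literal shared by both Pythons (both build the identical `families` dict)
def pvFamiliesKV : List (String × String) :=
  [("apnews.com", "wire"),
   ("reuters.com", "wire"),
   ("bbc.com", "wire"), ("bbc.co.uk", "wire"),
   ("congress.gov", "legislative"),
   ("courtlistener.com", "legal"), ("storage.courtlistener.com", "legal"),
   ("supremecourt.gov", "legal"),
   ("pubmed.ncbi.nlm.nih.gov", "research"),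
   ("arxiv.org", "research"),
   ("nature.com", "research"),
   ("science.org", "research")]

def pvFamilies : PySem.Dict String String := PySem.Dict.ofList pvFamiliesKV

-- A's `for fd, fam in families.items(): if d.endswith("." + fd): return fam`
def pvAScan (d : String) : List (String × String) → Option String
  | [] => none
  | (fd, fam) :: rest =>
      if PySem.Str.endswith d ("." ++ fd) then some fam else pvAScan d rest

def domain_family_py (domain : String) : String :=
  let d := PySem.Str.lower domain
  match pvFamilies.get? d with
  | some fam => fam                         -- if d in families: return families[d]
  | none =>
    match pvAScan d pvFamilies.items with
    | some fam => fam
    | none => d                             -- use domain itself as family for unknowns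

-- ===== PORT B =====
-- B's `candidates = [d] + [d[i + 1:] for i in range(len(d)) if d[i] == '.']`
-- (for i in range, d[i] is in range, so List.getD is exact; d[i+1:] is drop (i+1))
def pvCandidates (d : String) : List String :=
  d :: ((List.range d.toList.length).filterMap (fun i =>
    if d.toList.getD i ' ' = '.' then some (String.ofList (d.toList.drop (i + 1))) else none))

-- B's `for c in candidates: if c in families: return families[c]` = first candidate with a hit
def domain_family_py_alt (domain : String) : String :=
  let d := PySem.Str.lower domain
  match (pvCandidates d).findSome? (fun c => pvFamilies.get? c) with
  | some fam => fam
  | none => d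

-- ===== PRECONDITION & SPEC =====
def Spec_domain_family_py (domain : String) (out : String) : Prop := out = domain_family_py_alt domain
instance (domain : String) (out : String) : Decidable (Spec_domain_family_py domain out) := by unfold Spec_domain_family_py; infer_instance

-- ===== CLAIM (what is proved, stated in full; the proofs are below) =====
def Claim_equal_domain_family_py : Prop := ∀ (domain : String), Dom_domain_family_py domain → Spec_domain_family_py domain (domain_family_py domain)

-- ===== LEMMAS AND PROOFS =====

-- key k (with a leading dot) is a dot-boundary suffix of the char list cs
def pvMatches (cs : List Char) (k : String) : Prop := ('.' :: k.toList) <:+ cs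

theorem pv_families_mk : pvFamilies = PySem.Dict.mk pvFamiliesKV := by decide

theorem pv_endswith_iff (d k : String) :
    PySem.Str.endswith d ("." ++ k) = true ↔ pvMatches d.toList k := by
  simp [PySem.Chars.endswith_iff, pvMatches]

theorem pvAScan_cons (d fd fam : String) (rest : List (String × String)) :
    pvAScan d ((fd, fam) :: rest) =
      if PySem.Str.endswith d ("." ++ fd) = true then some fam else pvAScan d rest := rfl

-- assoc-list facts about Dict.mk
theorem pv_get?_mk_mem (l : List (String × String)) (s v : String)
    (h : (PySem.Dict.mk l).get? s = some v) : (s, v) ∈ l := by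
  induction l with
  | nil => simp [PySem.Dict.get?] at h
  | cons p rest ih =>
    rw [PySem.Dict.get?_mk_cons] at h
    by_cases he : p.1 = s
    · simp [he] at h
      exact List.mem_cons.mpr (Or.inl (Prod.ext_iff.mpr ⟨he, h⟩).symm)
    · simp [he] at h
      exact List.mem_cons_of_mem _ (ih h)

theorem pv_get?_mk_of_mem (l : List (String × String)) (hnd : (l.map Prod.fst).Nodup)
    (k v : String) (h : (k, v) ∈ l) : (PySem.Dict.mk l).get? k = some v := by
  induction l with
  | nil => simp at h
  | cons p rest ih =>
    rw [List.map_cons, List.nodup_cons] at hnd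
    rw [PySem.Dict.get?_mk_cons]
    rcases List.mem_cons.mp h with h1 | h1
    · simp [← h1]
    · have hne : p.1 ≠ k := by
        intro he
        exact hnd.1 (he ▸ List.mem_map_of_mem h1)
      simp only [beq_iff_eq, if_neg hne]
      exact ih hnd.2 h1

-- A's scan: none iff nothing matches; on a match it returns the value of some matching key
theorem pv_aScan_none (d : String) (L : List (String × String))
    (h : ∀ p ∈ L, ¬ pvMatches d.toList p.1) : pvAScan d L = none := by
  induction L with
  | nil => rfl
  | cons p rest ih =>
    obtain ⟨fd, fam⟩ := p
    have hm : ¬ pvMatches d.toList fd := h (fd, fam) List.mem_cons_self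
    rw [pvAScan_cons, if_neg (fun ht => hm ((pv_endswith_iff d fd).mp ht))]
    exact ih (fun p hp => h p (List.mem_cons_of_mem _ hp))

theorem pv_aScan_some (d : String) (L : List (String × String))
    (h : ∃ p ∈ L, pvMatches d.toList p.1) :
    ∃ p ∈ L, pvMatches d.toList p.1 ∧ pvAScan d L = some p.2 := by
  induction L with
  | nil => simp at h
  | cons q rest ih =>
    obtain ⟨fd, fam⟩ := q
    by_cases hm : pvMatches d.toList fd
    · refine ⟨(fd, fam), List.mem_cons_self, hm, ?_⟩
      rw [pvAScan_cons, if_pos ((pv_endswith_iff d fd).mpr hm)]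
    · have h' : ∃ p ∈ rest, pvMatches d.toList p.1 := by
        rcases h with ⟨p, hp, hpm⟩
        rcases List.mem_cons.mp hp with h1 | h1
        · exact absurd (by rw [h1] at hpm; exact hpm) hm
        · exact ⟨p, h1, hpm⟩
      rcases ih h' with ⟨p, hp, hpm, heq⟩
      refine ⟨p, List.mem_cons_of_mem _ hp, hpm, ?_⟩
      rw [pvAScan_cons, if_neg (fun ht => hm ((pv_endswith_iff d fd).mp ht))]
      exact heq

-- dot-boundary suffixes of cs are exactly the drops after an index holding '.'
theorem pv_dot_suffix_iff (cs t : List Char) :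
    ('.' :: t) <:+ cs ↔ ∃ i, i < cs.length ∧ cs.getD i ' ' = '.' ∧ t = cs.drop (i + 1) := by
  constructor
  · rintro ⟨pre, hpre⟩
    refine ⟨pre.length, ?_, ?_, ?_⟩
    · rw [← hpre]; simp
    · rw [← hpre, List.getD_eq_getElem?_getD]
      simp
    · rw [← hpre, List.append_cons,
          show pre.length + 1 = (pre ++ ['.']).length by simp, List.drop_left]
  · rintro ⟨i, hi, hdot, ht⟩
    have hdrop : cs.drop i = '.' :: t := by
      rw [ht, ← List.getElem_cons_drop]
      congr 1
      rw [List.getD_eq_getElem cs ' ' hi] at hdot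
      exact hdot
    exact hdrop ▸ List.drop_suffix i cs

-- membership in B's tail candidate list ↔ dot-boundary suffix of d
theorem pv_cand_tail_mem (d s : String) :
    s ∈ (List.range d.toList.length).filterMap (fun i =>
        if d.toList.getD i ' ' = '.' then some (String.ofList (d.toList.drop (i + 1))) else none)
      ↔ pvMatches d.toList s := by
  rw [List.mem_filterMap, pvMatches, pv_dot_suffix_iff]
  constructor
  · rintro ⟨i, hi, hf⟩
    rw [List.mem_range] at hi
    by_cases hc : d.toList.getD i ' ' = '.'
    · rw [if_pos hc] at hf
      refine ⟨i, hi, hc, ?_⟩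
      have := Option.some.inj hf
      rw [← this]; simp
    · rw [if_neg hc] at hf; exact absurd hf (by simp)
  · rintro ⟨i, hi, hdot, ht⟩
    refine ⟨i, List.mem_range.mpr hi, ?_⟩
    rw [if_pos hdot, ← ht]
    simp

-- B: no candidate hits when nothing in the table matches (and d itself is absent)
theorem pv_B_none (d : String) (hd : pvFamilies.get? d = none)
    (h : ∀ p ∈ pvFamiliesKV, ¬ pvMatches d.toList p.1) :
    (pvCandidates d).findSome? (fun c => pvFamilies.get? c) = none := by
  rw [List.findSome?_eq_none_iff]
  intro c hc
  rcases List.mem_cons.mp hc with h1 | h1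
  · rw [h1]; exact hd
  · rcases ho : pvFamilies.get? c with _ | v
    · rfl
    · have hmem := pv_get?_mk_mem _ _ _ (pv_families_mk ▸ ho)
      exact absurd ((pv_cand_tail_mem d c).mp h1) (h _ hmem)

-- B: on a match (with d itself absent), the hit comes from some matching table key
theorem pv_B_some (d : String) (hd : pvFamilies.get? d = none)
    (h : ∃ p ∈ pvFamiliesKV, pvMatches d.toList p.1) :
    ∃ p ∈ pvFamiliesKV, pvMatches d.toList p.1 ∧
      (pvCandidates d).findSome? (fun c => pvFamilies.get? c) = some p.2 := by
  rcases hfs : (pvCandidates d).findSome? (fun c => pvFamilies.get? c) with _ | v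
  · exfalso
    rcases h with ⟨p, hp, hpm⟩
    have hcand : p.1 ∈ pvCandidates d :=
      List.mem_cons_of_mem _ ((pv_cand_tail_mem d p.1).mpr hpm)
    have := List.findSome?_eq_none_iff.mp hfs p.1 hcand
    rw [pv_families_mk, pv_get?_mk_of_mem _ (by decide) _ _ hp] at this
    exact absurd this (by simp)
  · rcases List.exists_of_findSome?_eq_some hfs with ⟨c, hc, hcv⟩
    have hmem := pv_get?_mk_mem _ _ _ (pv_families_mk ▸ hcv)
    rcases List.mem_cons.mp hc with h1 | h1
    · rw [h1] at hcv; rw [hcv] at hd; exact absurd hd (by simp)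
    · exact ⟨(c, v), hmem, (pv_cand_tail_mem d c).mp h1, rfl⟩

-- any two table keys that can both be dot-suffixes of one string carry the same family
theorem pv_coherent : ∀ p ∈ pvFamiliesKV, ∀ q ∈ pvFamiliesKV,
    (('.' :: p.1.toList) <:+ ('.' :: q.1.toList) ∨ ('.' :: q.1.toList) <:+ ('.' :: p.1.toList)) →
    p.2 = q.2 := by decide

-- ===== VERDICT (by name: the statement is the Claim_ definition above) =====
theorem domain_family_py_spec : Claim_equal_domain_family_py := by
  intro domain _
  unfold Spec_domain_family_py
  simp only [domain_family_py, domain_family_py_alt]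
  generalize PySem.Str.lower domain = d
  have hitems : pvFamilies.items = pvFamiliesKV := by rw [pv_families_mk]
  rcases hd : pvFamilies.get? d with _ | fam
  · rw [hitems]
    by_cases h : ∃ p ∈ pvFamiliesKV, pvMatches d.toList p.1
    · rcases pv_aScan_some d pvFamiliesKV h with ⟨p, hp, hpm, hA⟩
      rcases pv_B_some d hd h with ⟨q, hq, hqm, hB⟩
      have hval : p.2 = q.2 :=
        pv_coherent p hp q hq (List.suffix_or_suffix_of_suffix hpm hqm)
      rw [hA, hB, hval]
    · rw [pv_aScan_none d pvFamiliesKV (fun p hp hm => h ⟨p, hp, hm⟩),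
          pv_B_none d hd (fun p hp hm => h ⟨p, hp, hm⟩)]
  · simp only [pvCandidates, List.findSome?_cons, hd]
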